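-- pv_equiv track=rewrite | github.com/kaankaragur/better-infinite-storage-glitch | main.py | calculateResolution
-- ===== SOURCE A (Python) =====
-- def calculateResolution(lenght):
--     currentY = 1
--     currentX = 0
--     defStop = False
--     for i in range(lenght):
--         if currentX == 1920:
--             currentY += 1
--             if currentY == 1080:
--                 break
--             currentX = 0
--         currentX += 1
--     return [1920,currentY]
-- ===== SOURCE B (Python) =====
-- def calculateResolution(lenght):
--     if lenght <= 0:
--         return [1920, 1]
--     return [1920, min(1080, 1 + (lenght - 1) // 1920)]
-- ===== Notes on version B (the rewrite author's own statement) =====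
-- stated objective: faster
-- what changed: B replaces the O(n) pixel-filling simulation loop with a closed-form formula min(1080, 1 + (lenght-1)//1920) (clamped to 1 for non-positive lenght).
import Mathlib
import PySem

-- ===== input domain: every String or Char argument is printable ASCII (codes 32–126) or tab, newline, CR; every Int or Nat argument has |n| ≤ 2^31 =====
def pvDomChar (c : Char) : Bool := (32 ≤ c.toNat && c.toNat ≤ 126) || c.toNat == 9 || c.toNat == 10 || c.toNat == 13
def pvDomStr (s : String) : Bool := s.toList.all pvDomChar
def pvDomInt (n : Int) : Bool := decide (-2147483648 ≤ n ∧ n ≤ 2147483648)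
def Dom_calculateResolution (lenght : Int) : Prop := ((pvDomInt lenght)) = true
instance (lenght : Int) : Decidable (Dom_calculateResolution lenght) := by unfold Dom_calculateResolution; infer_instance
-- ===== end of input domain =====

-- B computes the same resolution pair by a closed-form formula instead of A's per-pixel loop.

-- ===== PORT A =====
-- A's 'for i in range(lenght)' loop on state (currentY, currentX); the 'break' is the early return
def pvLoopCR : Int → Int → Nat → Int × Int
  | y, x, 0 => (y, x)
  | y, x, Nat.succ n =>
    if x = 1920 then
      if y + 1 = 1080 then (y + 1, x)
      else pvLoopCR (y + 1) ((0 : Int) + 1) n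
    else pvLoopCR y (x + 1) n

def calculateResolution (lenght : Int) : List Int :=
  [1920, (pvLoopCR 1 0 lenght.toNat).1]

-- ===== PORT B =====
def calculateResolution_alt (lenght : Int) : List Int :=
  if lenght ≤ 0 then [1920, 1]
  else [1920, min 1080 (1 + PySem.Int.floordiv (lenght - 1) 1920)]

-- ===== PRECONDITION & SPEC =====
def Spec_calculateResolution (lenght : Int) (out : List Int) : Prop := out = calculateResolution_alt lenght
instance (lenght : Int) (out : List Int) : Decidable (Spec_calculateResolution lenght out) := by unfold Spec_calculateResolution; infer_instance

-- ===== CLAIM (what is proved, stated in full; the proofs are below) =====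
def Claim_equal_calculateResolution : Prop := ∀ (lenght : Int), Dom_calculateResolution lenght → Spec_calculateResolution lenght (calculateResolution lenght)

-- ===== LEMMAS AND PROOFS =====

-- closed-form description of A's loop state after k iterations (stop flag = the break was taken)
def pvFCR (k : Nat) : Int × Int :=
  if k = 0 then (1, 0)
  else if k ≤ 1079 * 1920 then (1 + ((k : Int) - 1) / 1920, ((k : Int) - 1) % 1920 + 1)
  else (1080, 1920)

-- loop invariant: starting from the state after j iterations, m more iterations land at min (j+m) (break point)
theorem pvLoopInv : ∀ (m j : Nat), j ≤ 1079 * 1920 →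
    pvLoopCR (pvFCR j).1 (pvFCR j).2 m = pvFCR (min (j + m) (1079 * 1920 + 1)) := by
  intro m
  induction m with
  | zero =>
    intro j hj
    have : min (j + 0) (1079 * 1920 + 1) = j := by omega
    rw [this]; rfl
  | succ n ih =>
    intro j hj
    by_cases hx : (pvFCR j).2 = 1920
    · by_cases hy : (pvFCR j).1 + 1 = 1080
      · -- break: this forces j = 1079*1920
        have hjN : j = 1079 * 1920 := by
          unfold pvFCR at hx hy; split_ifs at hx hy <;> omega
        have hmin : min (j + (n + 1)) (1079 * 1920 + 1) = 1079 * 1920 + 1 := by omega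
        simp only [pvLoopCR, if_pos hx, if_pos hy, hmin]
        unfold pvFCR at hy ⊢
        split_ifs at hy ⊢ <;> simp_all [Prod.ext_iff]
      · -- row change
        have hj1 : j + 1 ≤ 1079 * 1920 := by
          unfold pvFCR at hx hy; split_ifs at hx hy <;> omega
        have hstep : ((pvFCR j).1 + 1, (0 : Int) + 1) = pvFCR (j + 1) := by
          unfold pvFCR at hx ⊢; split_ifs at hx ⊢ <;> simp_all [Prod.ext_iff] <;> try omega
        simp only [pvLoopCR, if_pos hx, if_neg hy]
        have h1 : (pvFCR j).1 + 1 = (pvFCR (j + 1)).1 := by rw [← hstep]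
        have h2 : ((0 : Int) + 1) = (pvFCR (j + 1)).2 := by rw [← hstep]
        rw [h1, h2, ih (j + 1) hj1]
        congr 1; omega
    · -- same row
      have hj1 : j + 1 ≤ 1079 * 1920 := by
        unfold pvFCR at hx; split_ifs at hx <;> omega
      have hstep : ((pvFCR j).1, (pvFCR j).2 + 1) = pvFCR (j + 1) := by
        unfold pvFCR at hx ⊢; split_ifs at hx ⊢ <;> simp_all [Prod.ext_iff] <;> try omega
      simp only [pvLoopCR, if_neg hx]
      have h1 : (pvFCR j).1 = (pvFCR (j + 1)).1 := by rw [← hstep]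
      have h2 : (pvFCR j).2 + 1 = (pvFCR (j + 1)).2 := by rw [← hstep]
      rw [h1, h2, ih (j + 1) hj1]
      congr 1; omega

-- ===== VERDICT (by name: the statement is the Claim_ definition above) =====
theorem calculateResolution_spec : Claim_equal_calculateResolution := by
  intro lenght _
  unfold Spec_calculateResolution calculateResolution calculateResolution_alt
  have h0 : pvLoopCR 1 0 lenght.toNat = pvFCR (min (0 + lenght.toNat) (1079 * 1920 + 1)) :=
    pvLoopInv lenght.toNat 0 (by omega)
  rw [h0]
  rcases le_or_gt lenght 0 with h | h
  · have : lenght.toNat = 0 := by omega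
    simp [this, pvFCR, h]
  · have hne : ¬ lenght ≤ 0 := by omega
    have hfd : PySem.Int.floordiv (lenght - 1) 1920 = (lenght - 1) / 1920 :=
      PySem.Int.floordiv_eq_ediv_of_pos (by omega)
    have hcast : ((lenght.toNat : Int)) = lenght := Int.toNat_of_nonneg (by omega)
    unfold pvFCR
    split_ifs with h0' h1 <;> simp_all <;> omega
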